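-- pv_equiv track=rewrite | github.com/jyesselm/find_pair | prototypes/pair_identification/test_all_pairs.py | normalize_dssr_nt
-- ===== SOURCE A (Python) =====
-- def normalize_dssr_nt(nt: str) -> str:
--     """Convert DSSR nt format (A.G1) to res_id format (A-G-1)."""
--     parts = nt.split(".")
--     if len(parts) != 2:
--         return nt
--     chain = parts[0]
--     base_num = parts[1]
--
--     i = len(base_num) - 1
--     if i >= 0 and base_num[i].isalpha() and i > 0 and base_num[i-1].isdigit():
--         i -= 1
--     while i >= 0 and base_num[i].isdigit():
--         i -= 1
--     i += 1
--
--     if i <= 0: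
--         return f"{chain}-{base_num}-0"
--
--     base = base_num[:i]
--     num = base_num[i:]
--     return f"{chain}-{base}-{num}"
-- ===== SOURCE B (Python) =====
-- def normalize_dssr_nt(nt: str) -> str:
--     """Convert DSSR nt format (A.G1) to res_id format (A-G-1)."""
--     parts = nt.split(".")
--     if len(parts) != 2:
--         return nt
--     chain, base_num = parts
--
--     # one forward pass: run = length of the digit run ending at the current
--     # char, prev_run = the same for the previous char
--     prev_run = run = 0
--     for ch in base_num:
--         prev_run, run = run, (run + 1 if ch.isdigit() else 0)
--
--     if run:
--         num_len = run
--     elif base_num[-1:].isalpha() and prev_run: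
--         num_len = prev_run + 1
--     else:
--         num_len = 0
--
--     base = base_num[: len(base_num) - num_len]
--     num = base_num[len(base_num) - num_len:]
--     if not base:
--         return f"{chain}-{base_num}-0"
--     return f"{chain}-{base}-{num}"
-- ===== Notes on version B (the rewrite author's own statement) =====
-- stated objective: alternative
-- what changed: Replaces A's backward index walk over base_num (single-letter step plus a digit while-loop with index arithmetic) by one forward pass that keeps two rolling digit-run counters (run length ending at the current and at the previous char), from which the numeric tail is read off directly.
import Mathlib
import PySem

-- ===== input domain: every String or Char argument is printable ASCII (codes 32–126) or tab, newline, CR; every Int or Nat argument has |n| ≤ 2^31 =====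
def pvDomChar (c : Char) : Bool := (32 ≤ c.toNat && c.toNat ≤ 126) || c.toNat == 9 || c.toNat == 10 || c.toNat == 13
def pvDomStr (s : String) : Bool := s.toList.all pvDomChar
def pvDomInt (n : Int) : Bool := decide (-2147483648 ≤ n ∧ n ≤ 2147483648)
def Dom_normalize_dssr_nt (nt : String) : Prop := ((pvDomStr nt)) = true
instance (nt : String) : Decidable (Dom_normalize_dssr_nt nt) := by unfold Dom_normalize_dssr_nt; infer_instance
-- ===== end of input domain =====

-- B replaces A's backward index walk (letter step + digit while-loop) by one forward
-- pass keeping two rolling digit-run counters; objective: alternative (same O(n)).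

-- ===== PORT A =====
-- the 'while i >= 0 and base_num[i].isdigit(): i -= 1' loop of A
def pvWhileA (cs : List Char) (i : Int) : Int :=
  if h : 0 ≤ i ∧ (PySem.List.pyGet? cs i).elim false PySem.Chars.isdigit = true then
    pvWhileA cs (i - 1)
  else i
termination_by (i + 1).toNat
decreasing_by
  have := h.1
  omega

def normalize_dssr_nt (nt : String) : String :=
  match PySem.Str.split? nt "." with
  | some [chain, base_num] =>
    let cs := base_num.toList
    let i0 : Int := (cs.length : Int) - 1
    let i1 : Int :=
      if 0 ≤ i0 ∧ (PySem.List.pyGet? cs i0).elim false PySem.Chars.isalpha = true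
          ∧ 0 < i0 ∧ (PySem.List.pyGet? cs (i0 - 1)).elim false PySem.Chars.isdigit = true
      then i0 - 1 else i0
    let i : Int := pvWhileA cs i1 + 1
    if i ≤ 0 then
      String.ofList (chain.toList ++ '-' :: cs ++ ['-', '0'])
    else
      String.ofList (chain.toList ++ '-' :: PySem.List.slice cs none (some i)
                 ++ '-' :: PySem.List.slice cs (some i) none)
  | _ => nt

-- ===== PORT B =====
def normalize_dssr_nt_alt (nt : String) : String :=
  let parts := (PySem.Str.split? nt ".").getD []
  if hp : parts.length = 2 then
    let chain := parts[0]'(by omega)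
    let base_num := parts[1]'(by omega)
    let cs := base_num.toList
    -- forward pass: (prev_run, run) rolling digit-run lengths
    let pr : Int × Int :=
      cs.foldl (fun s ch => (s.2, if PySem.Chars.isdigit ch then s.2 + 1 else 0)) (0, 0)
    let num_len : Int :=
      if pr.2 ≠ 0 then pr.2
      else if PySem.Chars.strIsalpha (PySem.List.slice cs (some (-1)) none) = true ∧ pr.1 ≠ 0
      then pr.1 + 1
      else 0
    let cut : Int := (cs.length : Int) - num_len
    let base := PySem.List.slice cs none (some cut)
    let num := PySem.List.slice cs (some cut) none
    if base = [] then
      String.ofList (chain.toList ++ '-' :: cs ++ ['-', '0'])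
    else
      String.ofList (chain.toList ++ '-' :: base ++ '-' :: num)
  else nt

-- ===== PRECONDITION & SPEC =====
def Spec_normalize_dssr_nt (nt : String) (out : String) : Prop := out = normalize_dssr_nt_alt nt
instance (nt : String) (out : String) : Decidable (Spec_normalize_dssr_nt nt out) := by unfold Spec_normalize_dssr_nt; infer_instance

-- ===== CLAIM (what is proved, stated in full; the proofs are below) =====
def Claim_equal_normalize_dssr_nt : Prop := ∀ (nt : String), Dom_normalize_dssr_nt nt → Spec_normalize_dssr_nt nt (normalize_dssr_nt nt)

-- ===== LEMMAS AND PROOFS =====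

-- trailing digit-run length of a char list
def pvTdr (l : List Char) : Nat := (l.reverse.takeWhile PySem.Chars.isdigit).length
theorem pvTdr_le (l : List Char) : pvTdr l ≤ l.length := by
  have := (List.takeWhile_sublist (l := l.reverse) PySem.Chars.isdigit).length_le
  simpa [pvTdr] using this
theorem pvTdr_concat (t : List Char) (a : Char) :
    pvTdr (t ++ [a]) = if PySem.Chars.isdigit a then pvTdr t + 1 else 0 := by
  simp only [pvTdr, List.reverse_append, List.reverse_cons, List.reverse_nil, List.nil_append,
    List.cons_append, List.takeWhile_cons]
  split <;> simp
theorem pv_digit_not_alpha (c : Char) (h : PySem.Chars.isdigit c = true) :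
    PySem.Chars.isalpha c = false := by
  have h0 : '0'.val.toNat = 48 := rfl
  have h9 : '9'.val.toNat = 57 := rfl
  have hA : 'A'.val.toNat = 65 := rfl
  have hZ : 'Z'.val.toNat = 90 := rfl
  have ha : 'a'.val.toNat = 97 := rfl
  have hz : 'z'.val.toNat = 122 := rfl
  simp only [PySem.Chars.isdigit, PySem.Chars.isalpha, PySem.Chars.isupper, PySem.Chars.islower,
    Char.le_def, UInt32.le_iff_toNat_le, Bool.and_eq_true, decide_eq_true_eq,
    Bool.or_eq_false_iff, Bool.and_eq_false_iff, decide_eq_false_iff_not, not_le,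
    h0, h9, hA, hZ, ha, hz] at *
  omega
theorem pvWhileA_eq (cs : List Char) (n : Nat) (hn : n ≤ cs.length) :
    pvWhileA cs ((n : Int) - 1) = (n : Int) - 1 - pvTdr (cs.take n) := by
  induction n with
  | zero =>
    rw [pvWhileA]
    simp [pvTdr]
  | succ m ih =>
    have hm : m < cs.length := by omega
    have hget : PySem.List.pyGet? cs ((m + 1 : Nat) - 1 : Int) = some cs[m] := by
      have : ((m + 1 : Nat) : Int) - 1 = ((m : Nat) : Int) := by push_cast; ring
      rw [this, PySem.List.pyGet?_natCast, List.getElem?_eq_getElem hm]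
    have htake : cs.take (m + 1) = cs.take m ++ [cs[m]] := by
      rw [List.take_add_one, List.getElem?_eq_getElem hm]
      rfl
    rw [pvWhileA]
    by_cases hd : PySem.Chars.isdigit cs[m] = true
    · have hcond : 0 ≤ ((m + 1 : Nat) : Int) - 1 ∧
          (PySem.List.pyGet? cs ((m + 1 : Nat) - 1 : Int)).elim false PySem.Chars.isdigit = true := by
        refine ⟨by push_cast; omega, ?_⟩
        rw [hget]; simpa using hd
      rw [dif_pos hcond]
      have hstep : ((m + 1 : Nat) : Int) - 1 - 1 = ((m : Nat) : Int) - 1 := by push_cast; ring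
      rw [hstep, ih (by omega)]
      have : pvTdr (cs.take (m + 1)) = pvTdr (cs.take m) + 1 := by
        rw [htake, pvTdr_concat, if_pos hd]
      rw [this]; push_cast; ring
    · have hcond : ¬ (0 ≤ ((m + 1 : Nat) : Int) - 1 ∧
          (PySem.List.pyGet? cs ((m + 1 : Nat) - 1 : Int)).elim false PySem.Chars.isdigit = true) := by
        rintro ⟨-, hc⟩
        rw [hget] at hc
        simp at hc
        exact hd hc
      rw [dif_neg hcond]
      have : pvTdr (cs.take (m + 1)) = 0 := by
        rw [htake, pvTdr_concat, if_neg hd]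
      rw [this]; push_cast; ring
theorem pvFold_eq (cs : List Char) :
    cs.foldl (fun s ch => (s.2, if PySem.Chars.isdigit ch then s.2 + 1 else 0)) ((0 : Int), (0 : Int))
      = ((pvTdr cs.dropLast : Int), (pvTdr cs : Int)) := by
  induction cs using List.reverseRecOn with
  | nil => simp [pvTdr]
  | append_singleton t a ih =>
    rw [List.foldl_concat, ih, List.dropLast_concat, pvTdr_concat]
    by_cases hd : PySem.Chars.isdigit a = true
    · simp [hd]
    · simp [hd]
theorem pv_slice_last (t : List Char) (a : Char) :
    PySem.List.slice (t ++ [a]) (some (-1)) none = [a] := by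
  have hnn : ¬ ((t.length : Int) < 0) := by omega
  simp [PySem.List.slice, PySem.List.clampIdx, hnn]
theorem pv_render (cl cs : List Char) (hcs : cs ≠ []) (m : Int) (_h0 : 0 ≤ m)
    (hm : m ≤ (cs.length : Int)) (i : Int) (hi : i = (cs.length : Int) - m) :
    (if i ≤ 0 then String.ofList (cl ++ '-' :: cs ++ ['-', '0'])
     else String.ofList (cl ++ '-' :: PySem.List.slice cs none (some i)
                      ++ '-' :: PySem.List.slice cs (some i) none))
    = (if PySem.List.slice cs none (some ((cs.length : Int) - m)) = [] then
         String.ofList (cl ++ '-' :: cs ++ ['-', '0'])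
       else
         String.ofList (cl ++ '-' :: PySem.List.slice cs none (some ((cs.length : Int) - m))
                     ++ '-' :: PySem.List.slice cs (some ((cs.length : Int) - m)) none)) := by
  subst hi
  by_cases hz : (cs.length : Int) - m ≤ 0
  · have h0' : (cs.length : Int) - m = 0 := by omega
    rw [h0']
    have : PySem.List.slice cs none (some (0 : Int)) = [] := by
      rw [PySem.List.slice_to cs (by omega)]
      simp
    simp [this]
  · have hb : PySem.List.slice cs none (some ((cs.length : Int) - m)) ≠ [] := by
      rw [PySem.List.slice_to cs (by omega)]
      rw [Ne, List.take_eq_nil_iff]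
      push Not
      exact ⟨by omega, hcs⟩
    rw [if_neg hz, if_neg hb]

theorem pv_key (chain base_num : String) :
    (let cs := base_num.toList
     let i0 : Int := (cs.length : Int) - 1
     let i1 : Int :=
       if 0 ≤ i0 ∧ (PySem.List.pyGet? cs i0).elim false PySem.Chars.isalpha = true
           ∧ 0 < i0 ∧ (PySem.List.pyGet? cs (i0 - 1)).elim false PySem.Chars.isdigit = true
       then i0 - 1 else i0
     let i : Int := pvWhileA cs i1 + 1
     if i ≤ 0 then
       String.ofList (chain.toList ++ '-' :: cs ++ ['-', '0'])
     else
       String.ofList (chain.toList ++ '-' :: PySem.List.slice cs none (some i)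
                  ++ '-' :: PySem.List.slice cs (some i) none))
    = (let cs := base_num.toList
       let pr : Int × Int :=
         cs.foldl (fun s ch => (s.2, if PySem.Chars.isdigit ch then s.2 + 1 else 0)) (0, 0)
       let num_len : Int :=
         if pr.2 ≠ 0 then pr.2
         else if PySem.Chars.strIsalpha (PySem.List.slice cs (some (-1)) none) = true ∧ pr.1 ≠ 0
         then pr.1 + 1
         else 0
       let cut : Int := (cs.length : Int) - num_len
       let base := PySem.List.slice cs none (some cut)
       let num := PySem.List.slice cs (some cut) none
       if base = [] then
         String.ofList (chain.toList ++ '-' :: cs ++ ['-', '0'])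
       else
         String.ofList (chain.toList ++ '-' :: base ++ '-' :: num)) := by
  dsimp only
  generalize chain.toList = cl
  generalize base_num.toList = cs
  rcases List.eq_nil_or_concat cs with rfl | ⟨t, a, rfl⟩
  · rw [pvWhileA]
    norm_num [PySem.List.pyGet?, PySem.List.slice, PySem.List.clampIdx, PySem.Chars.strIsalpha]
  · simp only [List.concat_eq_append]
    rw [pvFold_eq, pv_slice_last, List.dropLast_concat]
    have hsa : PySem.Chars.strIsalpha [a] = PySem.Chars.isalpha a := by
      simp [PySem.Chars.strIsalpha]
    rw [hsa]
    have hga : PySem.List.pyGet? (t ++ [a]) (((t ++ [a]).length : Int) - 1) = some a := by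
      have h1 : ((t ++ [a]).length : Int) - 1 = ((t.length : Nat) : Int) := by simp
      rw [h1, PySem.List.pyGet?_natCast, List.getElem?_concat_length]
    dsimp only
    by_cases hd : PySem.Chars.isdigit a = true
    · -- last char is a digit: A skips the digit run, B's run counter is it
      have hna : PySem.Chars.isalpha a = false := pv_digit_not_alpha a hd
      have hC : ¬ (0 ≤ ((t ++ [a]).length : Int) - 1 ∧
          (PySem.List.pyGet? (t ++ [a]) (((t ++ [a]).length : Int) - 1)).elim false
            PySem.Chars.isalpha = true ∧
          0 < ((t ++ [a]).length : Int) - 1 ∧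
          (PySem.List.pyGet? (t ++ [a]) (((t ++ [a]).length : Int) - 1 - 1)).elim false
            PySem.Chars.isdigit = true) := by
        rintro ⟨-, hc, -, -⟩
        rw [hga] at hc
        simp [hna] at hc
      rw [if_neg hC]
      have hw := pvWhileA_eq (t ++ [a]) (t ++ [a]).length le_rfl
      rw [List.take_length] at hw
      rw [hw]
      have htd : pvTdr (t ++ [a]) = pvTdr t + 1 := by rw [pvTdr_concat, if_pos hd]
      have hpos : ((pvTdr (t ++ [a]) : Int)) ≠ 0 := by rw [htd]; push_cast; omega
      rw [if_pos hpos]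
      refine pv_render cl (t ++ [a]) (by simp) _ (by positivity) ?_ _ (by ring)
      exact_mod_cast pvTdr_le (t ++ [a])
    · -- last char not a digit
      have htd0 : pvTdr (t ++ [a]) = 0 := by rw [pvTdr_concat, if_neg hd]
      have hz : ¬ ((pvTdr (t ++ [a]) : Int) ≠ 0) := by rw [htd0]; simp
      rw [if_neg hz]
      by_cases ha : PySem.Chars.isalpha a = true
      · rcases List.eq_nil_or_concat t with rfl | ⟨u, b, rfl⟩
        · -- single letter: A's letter step blocked by i > 0, B's prev_run is 0
          simp only [List.nil_append] at *
          have hC : ¬ (0 ≤ (([a] : List Char).length : Int) - 1 ∧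
              (PySem.List.pyGet? [a] ((([a] : List Char).length : Int) - 1)).elim false
                PySem.Chars.isalpha = true ∧
              0 < (([a] : List Char).length : Int) - 1 ∧
              (PySem.List.pyGet? [a] ((([a] : List Char).length : Int) - 1 - 1)).elim false
                PySem.Chars.isdigit = true) := by
            rintro ⟨-, -, hlt, -⟩
            norm_num at hlt
          rw [if_neg hC]
          have hw := pvWhileA_eq [a] ([a] : List Char).length le_rfl
          rw [List.take_length] at hw
          rw [hw]
          have hc2 : ¬ (PySem.Chars.isalpha a = true ∧ ((pvTdr ([] : List Char) : Int)) ≠ 0) := by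
            simp [pvTdr]
          rw [if_neg hc2]
          rw [htd0]
          exact pv_render cl [a] (by simp) 0 le_rfl (by simp) _ (by push_cast; ring)
        · simp only [List.concat_eq_append] at *
          have hgb : PySem.List.pyGet? ((u ++ [b]) ++ [a])
              ((((u ++ [b]) ++ [a]).length : Int) - 1 - 1) = some b := by
            have h1 : ((((u ++ [b]) ++ [a]).length : Int)) - 1 - 1 = ((u.length : Nat) : Int) := by
              push_cast [List.length_append, List.length_cons, List.length_nil]
              ring
            rw [h1, PySem.List.pyGet?_natCast, List.append_assoc]
            rw [List.getElem?_append_right le_rfl]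
            simp
          by_cases hb : PySem.Chars.isdigit b = true
          · -- digit-then-letter tail: A's letter step fires
            have hC : (0 ≤ (((u ++ [b]) ++ [a]).length : Int) - 1 ∧
                (PySem.List.pyGet? ((u ++ [b]) ++ [a]) ((((u ++ [b]) ++ [a]).length : Int) - 1)).elim
                  false PySem.Chars.isalpha = true ∧
                0 < (((u ++ [b]) ++ [a]).length : Int) - 1 ∧
                (PySem.List.pyGet? ((u ++ [b]) ++ [a])
                  ((((u ++ [b]) ++ [a]).length : Int) - 1 - 1)).elim false
                  PySem.Chars.isdigit = true) := by
              refine ⟨by simp; omega, ?_, ?_, ?_⟩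
              · rw [hga]; simpa using ha
              · simp [List.length_append]; omega
              · rw [hgb]; simpa using hb
            rw [if_pos hC]
            have hw := pvWhileA_eq ((u ++ [b]) ++ [a]) (((u ++ [b]) ++ [a]).length - 1) (by omega)
            have hl1 : ((u ++ [b]) ++ [a]).length - 1 = (u ++ [b]).length := by simp
            rw [hl1, List.take_left] at hw
            have hn1 : 1 ≤ ((u ++ [b]) ++ [a]).length := by simp
            have hidx : ((((u ++ [b]) ++ [a]).length : Int)) - 1 - 1
                = (((u ++ [b]).length : Nat) : Int) - 1 := by
              simp [List.length_append]; ring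
            rw [hidx, hw]
            have hptb : pvTdr (u ++ [b]) = pvTdr u + 1 := by rw [pvTdr_concat, if_pos hb]
            have hc2 : (PySem.Chars.isalpha a = true ∧ ((pvTdr (u ++ [b]) : Int)) ≠ 0) := by
              refine ⟨ha, ?_⟩
              rw [hptb]; push_cast; omega
            rw [if_pos hc2]
            have hle := pvTdr_le (u ++ [b])
            have hlen2 : ((u ++ [b]) ++ [a]).length = (u ++ [b]).length + 1 := by simp
            refine pv_render cl ((u ++ [b]) ++ [a]) (by simp) ((pvTdr (u ++ [b]) : Int) + 1)
              (by positivity) (by omega) _ (by omega)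
          · -- tail letter not preceded by a digit: no num on either side
            have hC : ¬ (0 ≤ (((u ++ [b]) ++ [a]).length : Int) - 1 ∧
                (PySem.List.pyGet? ((u ++ [b]) ++ [a]) ((((u ++ [b]) ++ [a]).length : Int) - 1)).elim
                  false PySem.Chars.isalpha = true ∧
                0 < (((u ++ [b]) ++ [a]).length : Int) - 1 ∧
                (PySem.List.pyGet? ((u ++ [b]) ++ [a])
                  ((((u ++ [b]) ++ [a]).length : Int) - 1 - 1)).elim false
                  PySem.Chars.isdigit = true) := by
              rintro ⟨-, -, -, hc⟩
              rw [hgb] at hc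
              simp [hb] at hc
            rw [if_neg hC]
            have hw := pvWhileA_eq ((u ++ [b]) ++ [a]) ((u ++ [b]) ++ [a]).length le_rfl
            rw [List.take_length] at hw
            rw [hw]
            have hptb0 : pvTdr (u ++ [b]) = 0 := by rw [pvTdr_concat, if_neg hb]
            have hc2 : ¬ (PySem.Chars.isalpha a = true ∧ ((pvTdr (u ++ [b]) : Int)) ≠ 0) := by
              simp [hptb0]
            rw [if_neg hc2]
            rw [htd0]
            exact pv_render cl ((u ++ [b]) ++ [a]) (by simp) 0 le_rfl (by positivity) _
              (by push_cast; ring)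
      · -- last char neither digit nor letter
        have hC : ¬ (0 ≤ ((t ++ [a]).length : Int) - 1 ∧
            (PySem.List.pyGet? (t ++ [a]) (((t ++ [a]).length : Int) - 1)).elim false
              PySem.Chars.isalpha = true ∧
            0 < ((t ++ [a]).length : Int) - 1 ∧
            (PySem.List.pyGet? (t ++ [a]) (((t ++ [a]).length : Int) - 1 - 1)).elim false
              PySem.Chars.isdigit = true) := by
          rintro ⟨-, hc, -, -⟩
          rw [hga] at hc
          simp at hc
          exact ha hc
        rw [if_neg hC]
        have hw := pvWhileA_eq (t ++ [a]) (t ++ [a]).length le_rfl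
        rw [List.take_length] at hw
        rw [hw]
        rw [if_neg (show ¬ (PySem.Chars.isalpha a = true ∧ ((pvTdr t : Int)) ≠ 0) from
          fun h => ha h.1)]
        rw [htd0]
        exact pv_render cl (t ++ [a]) (by simp) 0 le_rfl (by positivity) _ (by push_cast; ring)

-- case split on the split?-result, shared by both ports
theorem pv_main (nt : String) (o : Option (List String)) :
    (match o with
     | some [chain, base_num] =>
       let cs := base_num.toList
       let i0 : Int := (cs.length : Int) - 1
       let i1 : Int :=
         if 0 ≤ i0 ∧ (PySem.List.pyGet? cs i0).elim false PySem.Chars.isalpha = true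
             ∧ 0 < i0 ∧ (PySem.List.pyGet? cs (i0 - 1)).elim false PySem.Chars.isdigit = true
         then i0 - 1 else i0
       let i : Int := pvWhileA cs i1 + 1
       if i ≤ 0 then
         String.ofList (chain.toList ++ '-' :: cs ++ ['-', '0'])
       else
         String.ofList (chain.toList ++ '-' :: PySem.List.slice cs none (some i)
                    ++ '-' :: PySem.List.slice cs (some i) none)
     | _ => nt)
    = (let parts := o.getD []
       if hp : parts.length = 2 then
         let chain := parts[0]'(by omega)
         let base_num := parts[1]'(by omega)
         let cs := base_num.toList
         let pr : Int × Int :=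
           cs.foldl (fun s ch => (s.2, if PySem.Chars.isdigit ch then s.2 + 1 else 0)) (0, 0)
         let num_len : Int :=
           if pr.2 ≠ 0 then pr.2
           else if PySem.Chars.strIsalpha (PySem.List.slice cs (some (-1)) none) = true ∧ pr.1 ≠ 0
           then pr.1 + 1
           else 0
         let cut : Int := (cs.length : Int) - num_len
         let base := PySem.List.slice cs none (some cut)
         let num := PySem.List.slice cs (some cut) none
         if base = [] then
           String.ofList (chain.toList ++ '-' :: cs ++ ['-', '0'])
         else
           String.ofList (chain.toList ++ '-' :: base ++ '-' :: num)
       else nt) := by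
  match o with
  | none => rfl
  | some [] => rfl
  | some [c] => rfl
  | some [c, b] => exact pv_key c b
  | some (c :: b :: x :: r) => rfl

-- ===== VERDICT (by name: the statement is the Claim_ definition above) =====
theorem normalize_dssr_nt_spec : Claim_equal_normalize_dssr_nt := by
  unfold Claim_equal_normalize_dssr_nt
  intro nt _
  unfold Spec_normalize_dssr_nt normalize_dssr_nt normalize_dssr_nt_alt
  exact pv_main nt (PySem.Str.split? nt ".")
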